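-- pv_equiv track=rewrite | github.com/R-M0207/random | fips140_2.py | theRunsTest
-- ===== SOURCE A (Python) =====
-- def theRunsTest(bitstream):
--     bitlen = len(bitstream)
--     idx = 0;run = 0;
--     runlength0 = {1:0,2:0,3:0,4:0,5:0,6:0}
--     runlength1 = {1:0,2:0,3:0,4:0,5:0,6:0}
--     while idx < bitlen:
--         x = bitstream[idx]
--         offset = 0
--         while idx + offset < bitlen:
--             if x == bitstream[idx + offset]:
--                 offset += 1
--             else:
--                 run = offset if offset <= 6 else 6
--                 if run > 0:
--                     if x == "0": runlength0[run] += 1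
--                     else:runlength1[run] += 1
--                 break
--         idx += offset
--     result0 = parseRunsTest(runlength0)
--     result1 = parseRunsTest(runlength1)
--     return result0,runlength0,result1,runlength1
--
-- def parseRunsTest(rundict):
--     return (2315 <= rundict[1] <= 2685) and (1114 <= rundict[2] <= 1386) and \
--         (527 <= rundict[3] <= 723) and (240 <= rundict[4] <= 384) and \
--         (103 <= rundict[5] <= 209) and (103 <= rundict[6] <= 209)
-- ===== SOURCE B (Python) =====
-- def parseRunsTest(rundict):
--     return (2315 <= rundict[1] <= 2685) and (1114 <= rundict[2] <= 1386) and \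
--         (527 <= rundict[3] <= 723) and (240 <= rundict[4] <= 384) and \
--         (103 <= rundict[5] <= 209) and (103 <= rundict[6] <= 209)
--
-- def theRunsTest(bitstream):
--     # Single pass over adjacent character pairs; a run is recorded at each
--     # position where the character differs from its successor (so, as in the
--     # original, the run reaching end-of-stream is never recorded).
--     runlength0 = dict.fromkeys(range(1, 7), 0)
--     runlength1 = dict.fromkeys(range(1, 7), 0)
--     run = 0
--     for a, b in zip(bitstream, bitstream[1:]):
--         run += 1
--         if a != b:
--             (runlength0 if a == "0" else runlength1)[min(run, 6)] += 1
--             run = 0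
--     return parseRunsTest(runlength0), runlength0, parseRunsTest(runlength1), runlength1
-- ===== Notes on version B (the rewrite author's own statement) =====
-- stated objective: faster
-- what changed: Replaced A's nested index-based while loops (outer run finder with an inner offset scan doing repeated subscripting) by a single pass over adjacent character pairs zip(s, s[1:]) with a running counter that records a run at each position where the character differs from its successor; the constant-factor speedup comes from dropping per-character index arithmetic and bounds-checked subscripting in favour of direct iteration, and the original's behaviour of never recording the run that reaches end-of-stream falls out of the pair truncation.
import Mathlib
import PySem

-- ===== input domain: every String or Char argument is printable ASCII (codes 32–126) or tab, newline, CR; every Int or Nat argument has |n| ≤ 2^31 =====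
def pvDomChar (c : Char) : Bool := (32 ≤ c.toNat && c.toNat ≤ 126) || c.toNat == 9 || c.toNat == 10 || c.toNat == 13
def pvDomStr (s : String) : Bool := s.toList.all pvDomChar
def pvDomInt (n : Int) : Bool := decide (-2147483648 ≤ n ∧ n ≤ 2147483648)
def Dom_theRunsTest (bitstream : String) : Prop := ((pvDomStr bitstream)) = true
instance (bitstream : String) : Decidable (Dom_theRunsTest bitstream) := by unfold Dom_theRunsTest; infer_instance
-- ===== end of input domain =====

-- B replaces A's nested index-based while loops by one pass over adjacent character
-- pairs zip(s, s[1:]) with a running counter (same values; measured constant-factor faster).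

-- ===== PORT A =====
-- parseRunsTest, identical helper in both sources
def pvParse (d : PySem.Dict Int Int) : Bool :=
  decide (2315 ≤ d.getD 1 0 ∧ d.getD 1 0 ≤ 2685) &&
  decide (1114 ≤ d.getD 2 0 ∧ d.getD 2 0 ≤ 1386) &&
  decide (527 ≤ d.getD 3 0 ∧ d.getD 3 0 ≤ 723) &&
  decide (240 ≤ d.getD 4 0 ∧ d.getD 4 0 ≤ 384) &&
  decide (103 ≤ d.getD 5 0 ∧ d.getD 5 0 ≤ 209) &&
  decide (103 ≤ d.getD 6 0 ∧ d.getD 6 0 ≤ 209)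

-- {1:0,...,6:0}
def pvInit : PySem.Dict Int Int := PySem.Dict.ofList [(1,0),(2,0),(3,0),(4,0),(5,0),(6,0)]

-- d[run] += 1  (run is always one of the present keys 1..6, so the KeyError branch is unreachable)
def pvBump (d : PySem.Dict Int Int) (run : Int) : PySem.Dict Int Int := d.modify run 0 (· + 1)

-- the inner 'while idx + offset < bitlen' loop; fuel only makes the recursion structural
def pvInnerA (s : List Char) (x : Char) (idx : Int) (d0 d1 : PySem.Dict Int Int)
    (offset : Int) : Nat → Int × PySem.Dict Int Int × PySem.Dict Int Int
  | 0 => (offset, d0, d1)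
  | fuel + 1 =>
    if idx + offset < (s.length : Int) then
      if x = PySem.List.pyGetD s (idx + offset) ' ' then
        pvInnerA s x idx d0 d1 (offset + 1) fuel
      else
        let run := if offset ≤ 6 then offset else 6
        if run > 0 then
          if x = '0' then (offset, pvBump d0 run, d1) else (offset, d0, pvBump d1 run)
        else (offset, d0, d1)
    else (offset, d0, d1)

-- the outer 'while idx < bitlen' loop
def pvOuterA (s : List Char) : Int → PySem.Dict Int Int → PySem.Dict Int Int → Nat →
    PySem.Dict Int Int × PySem.Dict Int Int
  | _, d0, d1, 0 => (d0, d1)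
  | idx, d0, d1, fuel + 1 =>
    if idx < (s.length : Int) then
      let x := PySem.List.pyGetD s idx ' '
      let r := pvInnerA s x idx d0 d1 0 (s.length + 1)
      pvOuterA s (idx + r.1) r.2.1 r.2.2 fuel
    else (d0, d1)

def theRunsTest (bitstream : String) : Bool × (List (Int × Int)) × Bool × (List (Int × Int)) :=
  let s := bitstream.toList
  let r := pvOuterA s 0 pvInit pvInit (s.length + 1)
  (pvParse r.1, r.1.items, pvParse r.2, r.2.items)

-- ===== PORT B =====
-- the body of B's for loop over zip(bitstream, bitstream[1:])
def pvStepB (st : Int × PySem.Dict Int Int × PySem.Dict Int Int) (p : Char × Char) :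
    Int × PySem.Dict Int Int × PySem.Dict Int Int :=
  let run := st.1 + 1
  if p.1 ≠ p.2 then
    if p.1 = '0' then (0, pvBump st.2.1 (min run 6), st.2.2)
    else (0, st.2.1, pvBump st.2.2 (min run 6))
  else (run, st.2.1, st.2.2)

def theRunsTest_alt (bitstream : String) : Bool × (List (Int × Int)) × Bool × (List (Int × Int)) :=
  let s := bitstream.toList
  let st := (s.zip (PySem.List.slice s (some 1) none)).foldl pvStepB (0, pvInit, pvInit)
  (pvParse st.2.1, st.2.1.items, pvParse st.2.2, st.2.2.items)

-- ===== PRECONDITION & SPEC =====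
def Spec_theRunsTest (bitstream : String) (out : Bool × (List (Int × Int)) × Bool × (List (Int × Int))) : Prop := out = theRunsTest_alt bitstream
instance (bitstream : String) (out : Bool × (List (Int × Int)) × Bool × (List (Int × Int))) : Decidable (Spec_theRunsTest bitstream out) := by unfold Spec_theRunsTest; infer_instance

-- ===== CLAIM (what is proved, stated in full; the proofs are below) =====
def Claim_equal_theRunsTest : Prop := ∀ (bitstream : String), Dom_theRunsTest bitstream → Spec_theRunsTest bitstream (theRunsTest bitstream)

-- ===== LEMMAS AND PROOFS =====

-- record one run of x (capped at 6) into the right dict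
def pvRec (x : Char) (run : Int) (d0 d1 : PySem.Dict Int Int) :
    PySem.Dict Int Int × PySem.Dict Int Int :=
  if x = '0' then (pvBump d0 run, d1) else (d0, pvBump d1 run)

-- common characterisation: consume one maximal run at a time, never recording the final run
def pvRuns : List Char → PySem.Dict Int Int → PySem.Dict Int Int → PySem.Dict Int Int × PySem.Dict Int Int
  | [], d0, d1 => (d0, d1)
  | c :: t, d0, d1 =>
    let j := (t.takeWhile (· == c)).length
    let rest := t.dropWhile (· == c)
    if rest = [] then (d0, d1)
    else
      let p := pvRec c (min ((j : Int) + 1) 6) d0 d1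
      pvRuns rest p.1 p.2
termination_by t => t.length
decreasing_by
  simp only [List.length_cons]
  exact Nat.lt_succ_of_le (List.length_dropWhile_le _ _)

-- decomposition of a nonempty suffix into its leading maximal run

lemma pv_inner_spec (s : List Char) (x : Char) (rest : List Char) (n : Nat)
    (d0 d1 : PySem.Dict Int Int) :
    ∀ (j k : Nat) (fuel : Nat),
      s.drop (n + k) = List.replicate j x ++ rest →
      (∀ e es, rest = e :: es → e ≠ x) →
      s.length - (n + k) < fuel →
      pvInnerA s x (n : Int) d0 d1 (k : Int) fuel =
        (((k + j : Nat) : Int),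
          match rest with
          | [] => (d0, d1)
          | _ :: _ =>
            let run : Int := if ((k + j : Nat) : Int) ≤ 6 then ((k + j : Nat) : Int) else 6
            if run > 0 then pvRec x run d0 d1 else (d0, d1)) := by
  intro j
  induction j with
  | zero =>
    intro k fuel hdrop hne hfuel
    cases fuel with
    | zero => omega
    | succ f =>
      simp only [List.replicate, List.nil_append] at hdrop
      cases rest with
      | nil =>
        have hlen : s.length ≤ n + k := List.drop_eq_nil_iff.mp hdrop
        simp only [pvInnerA]
        rw [if_neg (by omega)]
        simp
      | cons e es =>
        have hlt : n + k < s.length := by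
          by_contra h
          rw [List.drop_eq_nil_of_le (by omega)] at hdrop
          simp at hdrop
        have hget : s[n + k]? = some e := by
          have h2 : (s.drop (n+k))[0]? = s[(n+k)+0]? := List.getElem?_drop
          simp [hdrop] at h2; simpa using h2.symm
        have hgetD : PySem.List.pyGetD s ((n : Int) + (k : Int)) ' ' = e := by
          have : ((n : Int) + (k : Int)) = ((n + k : Nat) : Int) := by push_cast; ring
          rw [this, PySem.List.pyGetD_natCast]
          simp [List.getD, hget]
        simp only [pvInnerA]
        rw [if_pos (by omega), hgetD, if_neg (hne e es rfl).symm]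
        simp only [pvRec, Nat.add_zero]
        split_ifs <;> rfl
  | succ j ih =>
    intro k fuel hdrop hne hfuel
    have hlt : n + k < s.length := by
      by_contra h
      rw [List.drop_eq_nil_of_le (by omega)] at hdrop
      simp [List.replicate] at hdrop
    cases fuel with
    | zero => omega
    | succ f =>
      have hget : s[n + k]? = some x := by
        have h2 : (s.drop (n+k))[0]? = s[(n+k)+0]? := List.getElem?_drop
        simp [hdrop, List.replicate] at h2; simpa using h2.symm
      have hgetD : PySem.List.pyGetD s ((n : Int) + (k : Int)) ' ' = x := by
        have : ((n : Int) + (k : Int)) = ((n + k : Nat) : Int) := by push_cast; ring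
        rw [this, PySem.List.pyGetD_natCast]
        simp [List.getD, hget]
      have hdrop' : s.drop (n + (k+1)) = List.replicate j x ++ rest := by
        have : n + (k+1) = (n + k) + 1 := by omega
        rw [this, List.drop_add_one_eq_tail_drop, hdrop]
        simp [List.replicate]
      simp only [pvInnerA]
      rw [if_pos (by omega), if_pos hgetD.symm]
      have hcast : ((k : Int) + 1) = ((k + 1 : Nat) : Int) := by push_cast; ring
      rw [hcast, ih (k+1) f hdrop' hne (by omega)]
      have : k + 1 + j = k + (j + 1) := by omega
      rw [this]

lemma pv_decomp (c : Char) (t : List Char) :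
    t = List.replicate (t.takeWhile (· == c)).length c ++ t.dropWhile (· == c) ∧
    (∀ e es, t.dropWhile (· == c) = e :: es → e ≠ c) := by
  constructor
  · conv_lhs => rw [← List.takeWhile_append_dropWhile (p := (· == c)) (l := t)]
    congr 1
    apply List.eq_replicate_of_mem
    intro a ha
    have := List.mem_takeWhile_imp ha
    simpa using this
  · intro e es h
    have hw : (t.dropWhile (· == c)) ≠ [] := by simp [h]
    have := List.head_dropWhile_not (· == c) (l := t) (w := hw)
    simp [h] at this
    exact this

lemma pv_outer_spec : ∀ (fuel : Nat) (s : List Char) (n : Nat) (d0 d1 : PySem.Dict Int Int),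
    s.length - n < fuel →
    pvOuterA s (n : Int) d0 d1 fuel = pvRuns (s.drop n) d0 d1 := by
  intro fuel
  induction fuel with
  | zero => intro s n d0 d1 h; omega
  | succ f ih =>
    intro s n d0 d1 hfuel
    by_cases hn : n < s.length
    · obtain ⟨c, t', hct⟩ : ∃ c t', s.drop n = c :: t' := by
        cases h : s.drop n with
        | nil => exact absurd (List.drop_eq_nil_iff.mp h) (by omega)
        | cons a l => exact ⟨a, l, rfl⟩
      set j := (t'.takeWhile (· == c)).length with hj
      set rest := t'.dropWhile (· == c) with hrest
      obtain ⟨hdec, hne⟩ := pv_decomp c t'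
      have hdrop : s.drop (n + 0) = List.replicate (j + 1) c ++ rest := by
        rw [Nat.add_zero, hct]
        rw [List.replicate_succ, List.cons_append]
        congr 1
      have hget : s[n]? = some c := by
        have h2 : (s.drop n)[0]? = s[n+0]? := List.getElem?_drop
        simp [hct] at h2; simpa using h2.symm
      have hgetD : PySem.List.pyGetD s (n : Int) ' ' = c := by
        rw [PySem.List.pyGetD_natCast]
        simp [List.getD, hget]
      have h1 : (s.drop n).length = s.length - n := List.length_drop
      have h2 : t'.length = j + rest.length := by
        conv_lhs => rw [hdec]
        simp [hj, hrest]
      have hlen : s.length - n = j + 1 + rest.length := by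
        rw [hct] at h1
        simp at h1
        omega
      simp only [pvOuterA]
      rw [if_pos (by exact_mod_cast hn)]
      rw [hgetD]
      have h0 : ((0 : Nat) : Int) = (0 : Int) := rfl
      rw [← h0, pv_inner_spec s c rest n d0 d1 (j + 1) 0 (s.length + 1) hdrop hne (by omega)]
      cases hre : rest with
      | nil =>
        dsimp only
        have hcast : (n : Int) + ((0 + (j + 1) : Nat) : Int) = ((n + (j + 1) : Nat) : Int) := by
          push_cast; ring
        have hr0 : rest.length = 0 := by rw [hre]; rfl
        rw [hcast, ih s (n + (j + 1)) d0 d1 (by omega)]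
        rw [List.drop_eq_nil_of_le (by omega), hct]
        conv_lhs => rw [pvRuns]
        conv_rhs => rw [pvRuns]
        rw [if_pos (by rw [← hrest]; exact hre)]
      | cons e es =>
        dsimp only
        have hrun : (if ((0 + (j + 1) : Nat) : Int) ≤ 6 then ((0 + (j + 1) : Nat) : Int) else 6)
            = min ((j : Int) + 1) 6 := by
          split_ifs <;> push_cast <;> omega
        rw [hrun, if_pos (by omega)]
        have hcast : (n : Int) + ((0 + (j + 1) : Nat) : Int) = ((n + (j + 1) : Nat) : Int) := by
          push_cast; ring
        rw [hcast, ih s (n + (j + 1)) _ _ (by omega)]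
        rw [← hrest] at hdec
        have hdroprest : s.drop (n + (j + 1)) = rest := by
          have hleft : (List.replicate j c ++ rest).drop j = rest := by
            have h3 : (List.replicate j c ++ rest).drop (List.replicate j c).length = rest :=
              List.drop_left
            rw [List.length_replicate] at h3
            exact h3
          have hd : s.drop (n + (j + 1)) = (s.drop n).drop (j + 1) := by
            rw [List.drop_drop]
          rw [hd, hct, List.drop_succ_cons, hdec, ← hj, hleft]
        rw [hdroprest, hct]
        conv_rhs => rw [pvRuns]
        rw [if_neg (by rw [← hrest]; simp [hre])]
    · simp only [pvOuterA]
      rw [if_neg (by omega), List.drop_eq_nil_of_le (by omega), pvRuns]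

lemma pv_climbB_nil (c : Char) :
    ∀ (j : Nat) (r : Int) (d0 d1 : PySem.Dict Int Int),
      List.foldl pvStepB (r, d0, d1) ((c :: List.replicate j c).zip (List.replicate j c)) =
        (r + (j : Int), d0, d1) := by
  intro j
  induction j with
  | zero => intro r d0 d1; simp
  | succ j ih =>
    intro r d0 d1
    rw [List.replicate_succ, List.zip_cons_cons, List.foldl_cons]
    have hsz : pvStepB (r, d0, d1) (c, c) = (r + 1, d0, d1) := by simp [pvStepB]
    rw [hsz, ih (r + 1) d0 d1]
    have : r + 1 + (j : Int) = r + ((j + 1 : Nat) : Int) := by push_cast; ring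
    rw [this]

lemma pv_climbB_cons (c e : Char) (es : List Char) (hne : e ≠ c) :
    ∀ (j : Nat) (r : Int) (d0 d1 : PySem.Dict Int Int),
      List.foldl pvStepB (r, d0, d1)
        ((c :: (List.replicate j c ++ e :: es)).zip (List.replicate j c ++ e :: es)) =
        List.foldl pvStepB (0, pvRec c (min (r + (j : Int) + 1) 6) d0 d1) ((e :: es).zip es) := by
  intro j
  induction j with
  | zero =>
    intro r d0 d1
    simp only [List.replicate, List.nil_append, List.zip_cons_cons, List.foldl_cons]
    have hstep : pvStepB (r, d0, d1) (c, e) = (0, pvRec c (min (r + 1) 6) d0 d1) := by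
      simp only [pvStepB, pvRec]
      rw [if_pos (fun h => hne h.symm)]
      split_ifs <;> rfl
    rw [hstep]
    norm_num
  | succ j ih =>
    intro r d0 d1
    rw [List.replicate_succ, List.cons_append, List.zip_cons_cons, List.foldl_cons]
    have hsz : pvStepB (r, d0, d1) (c, c) = (r + 1, d0, d1) := by simp [pvStepB]
    rw [hsz, ih (r + 1) d0 d1]
    have : r + 1 + (j : Int) + 1 = r + ((j + 1 : Nat) : Int) + 1 := by push_cast; ring
    rw [this]

lemma pv_foldB_spec : ∀ (N : Nat) (t : List Char), t.length ≤ N →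
    ∀ (d0 d1 : PySem.Dict Int Int),
      ((t.zip t.tail).foldl pvStepB (0, d0, d1)).2 = pvRuns t d0 d1 := by
  intro N
  induction N with
  | zero =>
    intro t ht d0 d1
    rw [(List.length_eq_zero_iff (l := t)).mp (by omega), pvRuns]
    rfl
  | succ N ih =>
    intro t ht d0 d1
    cases t with
    | nil => rw [pvRuns]; rfl
    | cons c t' =>
      set j := (t'.takeWhile (· == c)).length with hj
      set rest := t'.dropWhile (· == c) with hrest
      obtain ⟨hdec, hne⟩ := pv_decomp c t'
      rw [← hrest] at hdec
      rw [← hj] at hdec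
      have htail : (c :: t').tail = t' := rfl
      cases hre : rest with
      | nil =>
        rw [hre] at hdec
        rw [List.append_nil] at hdec
        conv_lhs => rw [htail, hdec]
        rw [pv_climbB_nil c j 0 d0 d1]
        conv_rhs => rw [pvRuns]
        rw [if_pos (by rw [← hrest]; exact hre)]
      | cons e es =>
        rw [hre] at hdec
        have hnec : e ≠ c := hne e es (by rw [← hrest]; exact hre)
        conv_lhs => rw [htail, hdec]
        rw [pv_climbB_cons c e es hnec j 0 d0 d1]
        have hes : ((e :: es).zip es) = ((e :: es).zip (e :: es).tail) := rfl
        have hlen : (e :: es).length ≤ N := by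
          have h1 := List.length_dropWhile_le (· == c) t'
          rw [← hrest, hre] at h1
          simp only [List.length_cons] at ht
          omega
        rw [hes, ih (e :: es) hlen _ _]
        conv_rhs => rw [pvRuns]
        rw [if_neg (by rw [← hrest]; simp [hre])]
        rw [← hrest, hre]
        have hm : (0 : Int) + (j : Int) + 1 = (j : Int) + 1 := by ring
        rw [hm]

-- ===== VERDICT (by name: the statement is the Claim_ definition above) =====
theorem theRunsTest_spec : Claim_equal_theRunsTest := by
  intro bitstream _
  unfold Spec_theRunsTest theRunsTest theRunsTest_alt
  dsimp only
  have hA := pv_outer_spec (bitstream.toList.length + 1) bitstream.toList 0 pvInit pvInit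
    (by omega)
  have hB := pv_foldB_spec bitstream.toList.length bitstream.toList le_rfl pvInit pvInit
  simp only [Int.natCast_zero] at hA
  rw [hA, PySem.List.slice_from_one, hB]
  simp
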